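-- pv_equiv track=rewrite | github.com/richardparle/GradTechTest | python/medals.py | createMedalTable
-- ===== SOURCE A (Python) =====
-- def createMedalTable(results):
--
--     medal_table = {}
--
--     medalists = []
--     first_place = []
--     second_place = []
--     third_place = []
--
--     # Place each medalist into "medalists" array
--     for event in results:
--         for country in event['podium']:
--             medalists.append(country)
--
--     # Seperate 1st, 2nd and 3rd into seperate arrays and remove first 2 characters
--     for medalist in medalists:
--         if medalist.startswith('1'):
--             first_place.append(medalist[2: len(medalist)])
--         if medalist.startswith('2'):
--             second_place.append(medalist[2: len(medalist)])
--         if medalist.startswith('3'):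
--             third_place.append(medalist[2: len(medalist)])
--
--     # Check if country exists in table, if it does then increament the value by the relavent amount, if not then add it.
--     for country in first_place:
--         if country in medal_table:
--             medal_table[country] += 3
--         else:
--             medal_table[country] = 3
--
--     for country in second_place:
--         if country in medal_table:
--             medal_table[country] += 2
--         else:
--             medal_table[country] = 2
--
--     for country in third_place:
--         if country in medal_table:
--             medal_table[country] += 1
--         else:
--             medal_table[country] = 1
--
--     return medal_table
-- ===== SOURCE B (Python) =====
-- def createMedalTable(results):
--     gold, silver, bronze = [], [], []
--     for event in results:
--         for entry in event['podium']:
--             rank = entry[:1]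
--             if rank == '1':
--                 gold.append(entry[2:])
--             elif rank == '2':
--                 silver.append(entry[2:])
--             elif rank == '3':
--                 bronze.append(entry[2:])
--     table = {}
--     for country in gold + silver + bronze:
--         if country not in table:
--             table[country] = 3 * gold.count(country) + 2 * silver.count(country) + bronze.count(country)
--     return table
-- ===== Notes on version B (the rewrite author's own statement) =====
-- stated objective: simpler
-- what changed: A's four passes (flatten all podiums into one list, re-scan it three times to classify by startswith, then three separate += accumulation loops over a shared dict) are replaced by one classification pass over the events plus a table in which each country's total is written exactly once with the closed formula 3*gold_count + 2*silver_count + bronze_count.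
import Mathlib
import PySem

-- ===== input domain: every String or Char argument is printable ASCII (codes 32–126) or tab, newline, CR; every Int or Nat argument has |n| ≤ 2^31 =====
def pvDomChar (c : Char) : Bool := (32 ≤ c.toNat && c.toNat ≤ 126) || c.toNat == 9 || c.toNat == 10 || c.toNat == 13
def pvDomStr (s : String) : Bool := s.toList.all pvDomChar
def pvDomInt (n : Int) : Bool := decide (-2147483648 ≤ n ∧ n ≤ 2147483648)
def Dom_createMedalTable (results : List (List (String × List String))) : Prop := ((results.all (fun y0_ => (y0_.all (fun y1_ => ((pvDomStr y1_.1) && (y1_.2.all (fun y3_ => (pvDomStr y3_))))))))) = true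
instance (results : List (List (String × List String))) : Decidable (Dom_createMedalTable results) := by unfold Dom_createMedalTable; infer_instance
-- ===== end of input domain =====

-- B replaces A's four passes (collect medalists, classify, three += accumulation loops) by one
-- classification pass plus a table whose entries are each written once as 3*#gold+2*#silver+#bronze.

-- event['podium'] (a missing 'podium' key raises KeyError in Python; excluded by Pre_,
-- so the .getD [] default is never reached on admitted inputs)
def pvPodium (event : List (String × List String)) : List String :=
  ((PySem.Dict.mk event).get? "podium").getD []

-- ===== PORT A =====
-- medalist[2 : len(medalist)]
def pvCutA (m : String) : String := PySem.Str.slice m (some 2) (some (PySem.Str.len m))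

-- the body of A's classification loop: three independent startswith tests
def pvStepA (acc : List String × List String × List String) (m : String) :
    List String × List String × List String :=
  let a1 := if PySem.Str.startswith m "1" then (acc.1 ++ [pvCutA m], acc.2.1, acc.2.2) else acc
  let a2 := if PySem.Str.startswith m "2" then (a1.1, a1.2.1 ++ [pvCutA m], a1.2.2) else a1
  if PySem.Str.startswith m "3" then (a2.1, a2.2.1, a2.2.2 ++ [pvCutA m]) else a2

-- the body of A's three table loops: membership test, then += k or = k
def pvAcc (k : Int) (d : PySem.Dict String Int) (c : String) : PySem.Dict String Int :=
  if d.contains c then d.insert c (d.getD c 0 + k) else d.insert c k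

def createMedalTable (results : List (List (String × List String))) : List (String × Int) :=
  let medalists := results.foldl (fun acc event => (pvPodium event).foldl (fun acc c => acc ++ [c]) acc) []
  let cls := medalists.foldl pvStepA ([], [], [])
  let t1 := cls.1.foldl (pvAcc 3) PySem.Dict.empty
  let t2 := cls.2.1.foldl (pvAcc 2) t1
  let t3 := cls.2.2.foldl (pvAcc 1) t2
  t3.items

-- ===== PORT B =====
-- entry[2:]
def pvCutB (m : String) : String := PySem.Str.slice m (some 2) none

-- the body of B's single classification pass: dispatch on rank = entry[:1]
def pvStepB (acc : List String × List String × List String) (entry : String) :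
    List String × List String × List String :=
  let rank := PySem.Str.slice entry none (some 1)
  if rank = "1" then (acc.1 ++ [pvCutB entry], acc.2.1, acc.2.2)
  else if rank = "2" then (acc.1, acc.2.1 ++ [pvCutB entry], acc.2.2)
  else if rank = "3" then (acc.1, acc.2.1, acc.2.2 ++ [pvCutB entry])
  else acc

def createMedalTable_alt (results : List (List (String × List String))) : List (String × Int) :=
  let p := results.foldl (fun acc event => (pvPodium event).foldl pvStepB acc) ([], [], [])
  let all := p.1 ++ p.2.1 ++ p.2.2
  (all.foldl (fun d c => if d.contains c then d
      else d.insert c (3 * (p.1.count c : Int) + 2 * (p.2.1.count c : Int) + (p.2.2.count c : Int)))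
    PySem.Dict.empty).items

-- ===== PRECONDITION & SPEC =====
-- Pre_ excludes exactly the events without a 'podium' key, on which the Python A raises KeyError.
def Pre_createMedalTable (results : List (List (String × List String))) : Prop :=
  ∀ event ∈ results, "podium" ∈ event.map Prod.fst
instance (results : List (List (String × List String))) : Decidable (Pre_createMedalTable results) := by unfold Pre_createMedalTable; infer_instance

def pvWitness_createMedalTable : (List (List (String × List String))) :=
  [[("podium", ["1 GBR", "2 USA", "3 FRA"])], [("podium", ["1 USA", "2 GBR"])]]

def Spec_createMedalTable (results : List (List (String × List String))) (out : List (String × Int)) : Prop := out = createMedalTable_alt results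
instance (results : List (List (String × List String))) (out : List (String × Int)) : Decidable (Spec_createMedalTable results out) := by unfold Spec_createMedalTable; infer_instance

-- ===== CLAIM (what is proved, stated in full; the proofs are below) =====
def Claim_equal_createMedalTable : Prop := ∀ (results : List (List (String × List String))), Dom_createMedalTable results → Pre_createMedalTable results → Spec_createMedalTable results (createMedalTable results)

-- ===== LEMMAS AND PROOFS =====

-- so is equality of entry[:1] with a one-character string
theorem pv_rank_iff (m : String) (c : Char) :
    PySem.Str.slice m none (some 1) = String.ofList [c] ↔ [c] <+: m.toList := by
  rw [← String.toList_inj]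
  simp only [PySem.Str.toList_slice, PySem.Chars.slice_eq_listSlice,
    PySem.List.slice_to m.toList (by norm_num : (0:Int) ≤ 1), String.toList_ofList]
  show m.toList.take 1 = [c] ↔ _
  rw [List.prefix_iff_eq_take]
  norm_num
  constructor <;> (intro h; exact h.symm)

-- two different single-character prefixes are impossible at once
theorem pv_prefix_excl (m : String) {c d : Char} (hcd : c ≠ d)
    (h : [c] <+: m.toList) : ¬ [d] <+: m.toList := by
  rcases h with ⟨t1, e1⟩
  rintro ⟨t2, e2⟩
  rw [← e1] at e2
  simp at e2
  exact hcd e2.1.symm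

theorem pv_rank_pos (m : String) (c : Char) (h : [c] <+: m.toList) :
    PySem.Str.slice m none (some 1) = String.ofList [c] := (pv_rank_iff m c).mpr h

theorem pv_rank_neg (m : String) (c : Char) (h : ¬ [c] <+: m.toList) :
    ¬ PySem.Str.slice m none (some 1) = String.ofList [c] := fun hh => h ((pv_rank_iff m c).mp hh)

-- m[2 : len(m)] = m[2:]
theorem pv_cut_eq (m : String) : pvCutA m = pvCutB m := by
  unfold pvCutA pvCutB
  rw [← String.toList_inj]
  simp only [PySem.Str.toList_slice, PySem.Chars.slice_eq_listSlice, PySem.Str.len_eq]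
  rw [PySem.List.slice_toNat _ (by norm_num) (by positivity), PySem.List.slice_from _ (by norm_num)]
  exact List.take_of_length_le (by simp)

-- the two classification loop bodies agree
theorem pv_step_eq : pvStepA = pvStepB := by
  funext acc m
  unfold pvStepA pvStepB
  have e1 : ("1" : String) = String.ofList ['1'] := by decide
  have e2 : ("2" : String) = String.ofList ['2'] := by decide
  have e3 : ("3" : String) = String.ofList ['3'] := by decide
  rw [e1, e2, e3]
  by_cases h1 : ['1'] <+: m.toList
  · have n2 := pv_prefix_excl m (by decide : ('1':Char) ≠ '2') h1
    have n3 := pv_prefix_excl m (by decide : ('1':Char) ≠ '3') h1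
    simp [PySem.Chars.startswith_iff, h1, n2, n3, pv_rank_pos m '1' h1, pv_cut_eq]
  · by_cases h2 : ['2'] <+: m.toList
    · have n3 := pv_prefix_excl m (by decide : ('2':Char) ≠ '3') h2
      simp [PySem.Chars.startswith_iff, h1, h2, n3, pv_rank_pos m '2' h2, pv_cut_eq]
    · by_cases h3 : ['3'] <+: m.toList
      · simp [PySem.Chars.startswith_iff, h1, h2, h3, pv_rank_pos m '3' h3, pv_cut_eq]
      · simp [PySem.Chars.startswith_iff, h1, h2, h3,
          pv_rank_neg m '1' h1, pv_rank_neg m '2' h2, pv_rank_neg m '3' h3]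

-- folding over the concatenation A builds first = B's nested fold
theorem pv_nested {σ : Type} (results : List (List (String × List String)))
    (f : σ → String → σ) (init : σ) (ms : List String) :
    (results.foldl (fun acc e => acc ++ pvPodium e) ms).foldl f init
      = results.foldl (fun acc e => (pvPodium e).foldl f acc) (ms.foldl f init) := by
  induction results generalizing ms with
  | nil => rfl
  | cons e l ih => simp only [List.foldl_cons, ih, List.foldl_append]

-- A's membership-test body is plain insert-accumulate
theorem pv_acc_eq (k : Int) : pvAcc k = fun d c => d.insert c (d.getD c 0 + k) := by
  funext d c
  unfold pvAcc
  cases h : d.contains c with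
  | true => simp
  | false => simp [PySem.Dict.getD_of_not_contains d 0 h]

-- value reached by an insert-accumulate loop
theorem pv_getD_acc (k : Int) (L : List String) (d : PySem.Dict String Int) (v : String) :
    (L.foldl (fun d c => d.insert c (d.getD c 0 + k)) d).getD v 0
      = d.getD v 0 + k * (L.count v : Int) := by
  induction L generalizing d with
  | nil => simp
  | cons c L ih =>
    simp only [List.foldl_cons, ih, PySem.Dict.getD_insert]
    by_cases h : v = c
    · subst h
      simp [List.count_cons_self]
      ring
    · simp [h]
      left
      rw [List.count_cons]
      simp [Ne.symm h]

-- keys reached by B's write-once loop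
theorem pv_keys_sd (val : String → Int) (L : List String) (d : PySem.Dict String Int) :
    (L.foldl (fun d c => if d.contains c then d else d.insert c (val c)) d).keys
      = PySem.Set.update d.keys L := by
  induction L generalizing d with
  | nil => simp [PySem.Set.update_nil]
  | cons c L ih =>
    simp only [List.foldl_cons, PySem.Set.update_cons]
    cases h : d.contains c with
    | true =>
      rw [if_pos rfl, ih, PySem.Set.add_of_mem ((PySem.Dict.contains_iff_mem_keys d c).mp h)]
    | false =>
      rw [if_neg (by simp), ih, PySem.Dict.keys_insert_of_not_contains d (val c) h,
        PySem.Set.add_of_not_mem (fun hm => by simp [(PySem.Dict.contains_iff_mem_keys d c).mpr hm] at h)]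

-- value reached by B's write-once loop
theorem pv_getD_sd (val : String → Int) (L : List String) (d : PySem.Dict String Int) (v : String) :
    (L.foldl (fun d c => if d.contains c then d else d.insert c (val c)) d).getD v 0
      = if d.contains v then d.getD v 0 else if v ∈ L then val v else 0 := by
  induction L generalizing d with
  | nil =>
    simp only [List.foldl_nil, List.not_mem_nil, if_false]
    cases hv : d.contains v with
    | true => simp
    | false => simp [PySem.Dict.getD_of_not_contains d 0 hv]
  | cons c L ih =>
    simp only [List.foldl_cons]
    cases h : d.contains c with
    | true =>
      rw [if_pos rfl, ih]
      by_cases hv : v = c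
      · subst hv
        simp [h]
      · simp [List.mem_cons, hv]
    | false =>
      rw [if_neg (by simp), ih]
      rw [PySem.Dict.contains_insert]
      by_cases hv : v = c
      · subst hv
        simp [h, PySem.Dict.getD_insert_self]
      · have hb : (v == c) = false := by simp [hv]
        simp [hb, hv, PySem.Dict.getD_insert_of_ne d (val c) 0 hv, List.mem_cons]

-- A's three accumulation loops and B's write-once table agree on the classified lists
theorem pv_tables (g s b : List String) :
    (b.foldl (pvAcc 1) (s.foldl (pvAcc 2) (g.foldl (pvAcc 3) PySem.Dict.empty))).items
      = ((g ++ s ++ b).foldl (fun d c => if d.contains c then d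
          else d.insert c (3 * (g.count c : Int) + 2 * (s.count c : Int) + (b.count c : Int)))
          PySem.Dict.empty).items := by
  rw [pv_acc_eq 1, pv_acc_eq 2, pv_acc_eq 3]
  have hkA : ((b.foldl (fun d c => d.insert c (d.getD c 0 + 1))
      (s.foldl (fun d c => d.insert c (d.getD c 0 + 2))
        (g.foldl (fun d c => d.insert c (d.getD c 0 + 3)) (PySem.Dict.empty : PySem.Dict String Int))))).keys
      = PySem.Set.ofList (g ++ s ++ b) := by
    rw [PySem.Dict.keys_foldl_insert, PySem.Dict.keys_foldl_insert, PySem.Dict.keys_foldl_insert,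
      PySem.Dict.keys_empty, PySem.Set.update_nil_left, ← PySem.Set.ofList_append,
      ← PySem.Set.ofList_append]
  have hkB : (((g ++ s ++ b).foldl (fun d c => if d.contains c then d
        else d.insert c (3 * (g.count c : Int) + 2 * (s.count c : Int) + (b.count c : Int)))
        (PySem.Dict.empty : PySem.Dict String Int))).keys = PySem.Set.ofList (g ++ s ++ b) := by
    rw [pv_keys_sd, PySem.Dict.keys_empty, PySem.Set.update_nil_left]
  have hnA : ((b.foldl (fun d c => d.insert c (d.getD c 0 + 1))
      (s.foldl (fun d c => d.insert c (d.getD c 0 + 2))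
        (g.foldl (fun d c => d.insert c (d.getD c 0 + 3)) (PySem.Dict.empty : PySem.Dict String Int))))).keys.Nodup := by
    rw [hkA]; exact PySem.Set.nodup_ofList _
  have hnB : (((g ++ s ++ b).foldl (fun d c => if d.contains c then d
        else d.insert c (3 * (g.count c : Int) + 2 * (s.count c : Int) + (b.count c : Int)))
        (PySem.Dict.empty : PySem.Dict String Int))).keys.Nodup := by
    rw [hkB]; exact PySem.Set.nodup_ofList _
  rw [PySem.Dict.items_eq_map_keys _ hnA 0, PySem.Dict.items_eq_map_keys _ hnB 0, hkA, hkB]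
  apply List.map_congr_left
  intro v hv
  have hvm : v ∈ g ++ s ++ b := (PySem.Set.mem_ofList _ v).mp hv
  have hA : (b.foldl (fun d c => d.insert c (d.getD c 0 + 1))
      (s.foldl (fun d c => d.insert c (d.getD c 0 + 2))
        (g.foldl (fun d c => d.insert c (d.getD c 0 + 3)) (PySem.Dict.empty : PySem.Dict String Int)))).getD v 0
      = 3 * (g.count v : Int) + 2 * (s.count v : Int) + (b.count v : Int) := by
    rw [pv_getD_acc, pv_getD_acc, pv_getD_acc, PySem.Dict.getD_empty]
    ring
  have hB : (((g ++ s ++ b).foldl (fun d c => if d.contains c then d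
        else d.insert c (3 * (g.count c : Int) + 2 * (s.count c : Int) + (b.count c : Int)))
        (PySem.Dict.empty : PySem.Dict String Int))).getD v 0
      = 3 * (g.count v : Int) + 2 * (s.count v : Int) + (b.count v : Int) := by
    rw [pv_getD_sd]
    have hce : ¬ (PySem.Dict.empty : PySem.Dict String Int).contains v = true := by
      simp [PySem.Dict.contains_empty]
    rw [if_neg hce, if_pos hvm]
  rw [hA, hB]

theorem pv_main (results : List (List (String × List String))) :
    createMedalTable results = createMedalTable_alt results := by
  unfold createMedalTable createMedalTable_alt
  simp only [PySem.List.foldl_append_singleton]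
  rw [pv_step_eq, pv_nested results pvStepB ([], [], []) []]
  exact pv_tables _ _ _

-- ===== VERDICT (by name: the statement is the Claim_ definition above) =====
theorem createMedalTable_spec : Claim_equal_createMedalTable := by
  intro results _ _
  exact pv_main results
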